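-- pv_equiv track=rewrite | github.com/gregland76/HT-TTC | HT TTC.py | _texte_nombre_partiel_valide
-- ===== SOURCE A (Python) =====
-- def _texte_nombre_partiel_valide(texte):
--     if texte == "":
--         return True
--
--     separateur_trouve = False
--     for index, caractere in enumerate(texte):
--         if caractere.isdigit():
--             continue
--
--         if caractere == "-":
--             if index != 0:
--                 return False
--             continue
--
--         if caractere in ",.":
--             if separateur_trouve:
--                 return False
--             separateur_trouve = True
--             continue
--
--         return False
--
--     return True
-- ===== SOURCE B (Python) =====
-- def _texte_nombre_partiel_valide(texte):
--     if texte == "":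
--         return True
--     body = texte[1:] if texte[0] == "-" else texte
--     if "-" in body:
--         return False
--     if sum(1 for c in body if c in ",.") > 1:
--         return False
--     return all(c in ",." or c.isdigit() for c in body)
-- ===== Notes on version B (the rewrite author's own statement) =====
-- stated objective: simpler
-- what changed: Replaces the indexed early-exit loop with a strip-the-leading-sign decomposition: peel an optional leading '-', then check no '-' remains, at most one ',' or '.', and every character is a separator or a digit, as three separate whole-string passes.
import Mathlib
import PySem

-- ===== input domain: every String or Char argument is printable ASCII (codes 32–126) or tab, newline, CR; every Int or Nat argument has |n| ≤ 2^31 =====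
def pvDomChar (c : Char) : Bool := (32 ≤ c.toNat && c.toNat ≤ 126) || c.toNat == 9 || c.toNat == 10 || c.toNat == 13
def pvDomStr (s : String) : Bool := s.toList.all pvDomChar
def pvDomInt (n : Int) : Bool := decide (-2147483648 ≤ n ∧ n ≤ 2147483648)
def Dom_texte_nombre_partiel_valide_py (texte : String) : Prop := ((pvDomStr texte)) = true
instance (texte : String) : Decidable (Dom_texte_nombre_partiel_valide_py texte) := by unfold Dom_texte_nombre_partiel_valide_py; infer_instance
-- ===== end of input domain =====

-- B replaces A's single indexed early-exit loop by a strip-sign-then-validate decomposition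
-- (peel a leading '-', then three separate checks on the rest); objective: simpler.

-- ===== PORT A =====
-- A's for-loop over enumerate(texte), carrying the separateur_trouve flag; early returns become result values.
def pvALoop : List (Int × Char) → Bool → Bool
  | [], _ => true
  | (i, c) :: rest, sep =>
    if PySem.Chars.isdigit c then pvALoop rest sep
    else if c == '-' then (if i != 0 then false else pvALoop rest sep)
    else if c == ',' || c == '.' then (if sep then false else pvALoop rest true)
    else false

def texte_nombre_partiel_valide_py (texte : String) : Bool :=
  if texte == "" then true
  else pvALoop (PySem.List.enumerate texte.toList 0) false

-- ===== PORT B =====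
def texte_nombre_partiel_valide_py_alt (texte : String) : Bool :=
  if texte == "" then true
  else
    let cs := texte.toList
    -- body = texte[1:] if texte[0] == "-" else texte
    let body := if PySem.List.pyGetD cs 0 ' ' == '-' then PySem.List.slice cs (some 1) none else cs
    if body.contains '-' then false
    else if 1 < body.countP (fun c => c == ',' || c == '.') then false
    else body.all (fun c => (c == ',' || c == '.') || PySem.Chars.isdigit c)

-- ===== PRECONDITION & SPEC =====
def Spec_texte_nombre_partiel_valide_py (texte : String) (out : Bool) : Prop := out = texte_nombre_partiel_valide_py_alt texte
instance (texte : String) (out : Bool) : Decidable (Spec_texte_nombre_partiel_valide_py texte out) := by unfold Spec_texte_nombre_partiel_valide_py; infer_instance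

-- ===== CLAIM (what is proved, stated in full; the proofs are below) =====
def Claim_equal_texte_nombre_partiel_valide_py : Prop := ∀ (texte : String), Dom_texte_nombre_partiel_valide_py texte → Spec_texte_nombre_partiel_valide_py texte (texte_nombre_partiel_valide_py texte)

-- ===== LEMMAS AND PROOFS =====

-- A's loop on tail positions (index ≥ 1) equals B's three checks on that suffix,
-- with the separator budget 0 or 1 according to the carried flag.
theorem pvALoop_tail (l : List Char) (s : Int) (hs : 1 ≤ s) (sep : Bool) :
    pvALoop (PySem.List.enumerate l s) sep =
      (!(l.contains '-') &&
       decide (l.countP (fun c => c == ',' || c == '.') ≤ (if sep then 0 else 1)) &&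
       l.all (fun c => (c == ',' || c == '.') || PySem.Chars.isdigit c)) := by
  induction l generalizing s sep with
  | nil => cases sep <;> simp [pvALoop]
  | cons c l ih =>
    rw [PySem.List.enumerate_cons]
    by_cases hd : PySem.Chars.isdigit c = true
    · have hneg : c ≠ '-' ∧ c ≠ ',' ∧ c ≠ '.' := by
        refine ⟨?_, ?_, ?_⟩ <;> rintro rfl <;> simp_all [PySem.Chars.isdigit] <;> revert hd <;> decide
      simp [pvALoop, hd, ih (s + 1) (by omega) sep, hneg.1, Ne.symm hneg.1, hneg.2.1, hneg.2.2, List.countP_cons]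
    · by_cases hm : c = '-'
      · subst hm
        have : (s != 0) = true := by simp; omega
        simp [pvALoop, hd, this]
      · by_cases hsepc : (c == ',' || c == '.') = true
        · cases sep with
          | true =>
            have h1 : c = ',' ∨ c = '.' := by
              rcases Bool.or_eq_true_iff.mp hsepc with h | h
              · exact Or.inl (by simpa using h)
              · exact Or.inr (by simpa using h)
            have hc : c ≠ '-' := by rcases h1 with rfl | rfl <;> decide
            simp [pvALoop, hd, hm, hsepc, List.countP_cons, hc, Ne.symm hc]
          | false =>
            have h1 : c = ',' ∨ c = '.' := by
              rcases Bool.or_eq_true_iff.mp hsepc with h | h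
              · exact Or.inl (by simpa using h)
              · exact Or.inr (by simpa using h)
            have hc : c ≠ '-' := by rcases h1 with rfl | rfl <;> decide
            rw [show pvALoop ((s, c) :: PySem.List.enumerate l (s + 1)) false
                  = pvALoop (PySem.List.enumerate l (s + 1)) true by
                simp [pvALoop, hd, hm, hsepc]]
            rw [ih (s + 1) (by omega) true]
            simp [Ne.symm hc, hsepc, List.countP_cons]
        · simp [pvALoop, hd, hm, hsepc]

theorem pvCnt1 (n : Nat) : (!decide (1 < n)) = decide (n ≤ 1) := by
  by_cases h : n ≤ 1 <;> simp [h] <;> omega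

theorem pvCnt0 (n : Nat) : (!decide (1 < n + 1)) = decide (n ≤ 0) := by
  by_cases h : n ≤ 0 <;> simp [h] <;> omega

-- ===== VERDICT (by name: the statement is the Claim_ definition above) =====
theorem texte_nombre_partiel_valide_py_spec : Claim_equal_texte_nombre_partiel_valide_py := by
  intro texte _
  unfold Spec_texte_nombre_partiel_valide_py texte_nombre_partiel_valide_py texte_nombre_partiel_valide_py_alt
  by_cases he : texte = ""
  · simp [he]
  · have hne : texte.toList ≠ [] := by
      simpa [String.toList_eq_nil_iff] using he
    obtain ⟨c, rest, hcs⟩ := List.exists_cons_of_ne_nil hne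
    have hbeq : (texte == "") = false := by simp [he]
    rw [hbeq]
    simp only [Bool.false_eq_true, if_false, hcs]
    rw [PySem.List.enumerate_cons]
    by_cases hm : c = '-'
    · subst hm
      have : pvALoop ((0, '-') :: PySem.List.enumerate rest (0 + 1)) false
          = pvALoop (PySem.List.enumerate rest 1) false := by
        simp [pvALoop, PySem.Chars.isdigit]
      rw [this, pvALoop_tail rest 1 (by omega) false]
      simp [PySem.List.pyGetD, PySem.List.pyGet?, PySem.List.pyIdx?, PySem.List.slice, pvCnt1,
            Bool.and_assoc]
    · by_cases hd : PySem.Chars.isdigit c = true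
      · have hneg : c ≠ ',' ∧ c ≠ '.' := by
          constructor <;> rintro rfl <;> revert hd <;> decide
        have : pvALoop ((0, c) :: PySem.List.enumerate rest (0 + 1)) false
            = pvALoop (PySem.List.enumerate rest 1) false := by
          simp [pvALoop, hd]
        rw [this, pvALoop_tail rest 1 (by omega) false]
        simp [PySem.List.pyGetD, PySem.List.pyGet?, PySem.List.pyIdx?, hm, Ne.symm hm,
              hd, hneg.1, hneg.2, List.countP_cons, pvCnt1, Bool.and_assoc]
      · by_cases hsepc : (c == ',' || c == '.') = true
        · have : pvALoop ((0, c) :: PySem.List.enumerate rest (0 + 1)) false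
              = pvALoop (PySem.List.enumerate rest 1) true := by
            simp [pvALoop, hd, hm, hsepc]
          rw [this, pvALoop_tail rest 1 (by omega) true]
          simp [PySem.List.pyGetD, PySem.List.pyGet?, PySem.List.pyIdx?, hm, Ne.symm hm,
                hsepc, List.countP_cons, pvCnt0, Bool.and_assoc]
          simp only [← decide_not, not_exists, not_or, not_and]
        · have : pvALoop ((0, c) :: PySem.List.enumerate rest (0 + 1)) false = false := by
            simp [pvALoop, hd, hm, hsepc]
          rw [this]
          simp [PySem.List.pyGetD, PySem.List.pyGet?, PySem.List.pyIdx?, hm, hd, hsepc]
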